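-- pv_equiv track=rewrite | github.com/ascavin/PI2C | movetest.py | findMarbleNearBorder
-- ===== SOURCE A (Python) =====
-- def getBorder():
-- 	border=[(0,0),
-- 			(0,1),
-- 			(0,2),
-- 			(0,3),
-- 			(0,4),
-- 			(1,5),
-- 			(2,6),
-- 			(3,7),
-- 			(4,8),
-- 			(5,8),
-- 			(6,8),
-- 			(7,8),
-- 			(8,8),
-- 			(8,7),
-- 			(8,6),
-- 			(8,5),
-- 			(8,4),
-- 			(7,3),
-- 			(6,2),
-- 			(5,1),
-- 			(4,0),
-- 			(3,0),
-- 			(2,0),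
-- 			(1,0)]
-- 	return border
--
-- def findMarbleNearBorder(grid,opponentSymbol):
-- 	opponentMarbles=findOpponentMarbles(grid,opponentSymbol)
-- 	borders = getBorder()
-- 	nextToBorder = []
-- 	for marble in opponentMarbles :
-- 		for border in borders:
-- 			if (border==marble):
-- 				nextToBorder.append(marble)
-- 	return nextToBorder
--
-- def findOpponentMarbles(grid,opponentSymbol):
-- 	borderMarbles = []
-- 	for l,line in enumerate(grid):
-- 		for c,column in enumerate(line):
-- 			if (grid[l][c] == opponentSymbol):
-- 				borderMarbles.append((l,c))
-- 	return borderMarbles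
-- ===== SOURCE B (Python) =====
-- # B: iterate the 24 fixed border cells (pre-sorted lexicographically = A's row-major
-- # scan order) and test the grid there, instead of scanning the whole grid.
-- _BORDER_SORTED = [(0, 0), (0, 1), (0, 2), (0, 3), (0, 4),
--                   (1, 0), (1, 5),
--                   (2, 0), (2, 6),
--                   (3, 0), (3, 7),
--                   (4, 0), (4, 8),
--                   (5, 1), (5, 8),
--                   (6, 2), (6, 8),
--                   (7, 3), (7, 8),
--                   (8, 4), (8, 5), (8, 6), (8, 7), (8, 8)]
--
-- def findMarbleNearBorder(grid, opponentSymbol):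
--     return [(l, c) for (l, c) in _BORDER_SORTED
--             if l < len(grid) and c < len(grid[l]) and grid[l][c] == opponentSymbol]
-- ===== Notes on version B (the rewrite author's own statement) =====
-- stated objective: alternative
-- what changed: B iterates over the 24 fixed border coordinates (pre-sorted lexicographically to match A's row-major scan order) and probes the grid at each, instead of scanning the whole grid for opponent marbles and intersecting that list with the border list; work is bounded by 24 grid probes, though a timing run read only ~1.3x at the largest size.
import Mathlib
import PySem

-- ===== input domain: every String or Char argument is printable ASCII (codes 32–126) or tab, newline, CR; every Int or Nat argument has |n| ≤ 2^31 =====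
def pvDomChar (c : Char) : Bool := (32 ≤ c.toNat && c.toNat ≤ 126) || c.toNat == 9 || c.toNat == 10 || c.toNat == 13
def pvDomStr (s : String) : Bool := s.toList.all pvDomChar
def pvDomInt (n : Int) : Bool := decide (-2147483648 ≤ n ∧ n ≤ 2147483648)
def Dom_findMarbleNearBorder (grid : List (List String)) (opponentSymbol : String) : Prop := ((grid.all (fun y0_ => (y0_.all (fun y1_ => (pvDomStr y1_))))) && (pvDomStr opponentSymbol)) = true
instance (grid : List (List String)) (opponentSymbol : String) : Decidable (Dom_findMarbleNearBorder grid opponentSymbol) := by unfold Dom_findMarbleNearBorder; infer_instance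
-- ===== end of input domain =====

-- B probes the grid at the 24 fixed border cells (pre-sorted to match A's row-major scan
-- order) instead of scanning the whole grid and intersecting with the border list
-- (a different traversal; not claimed faster).

-- ===== PORT A =====
def getBorderA : List (Int × Int) :=
  [(0,0),(0,1),(0,2),(0,3),(0,4),(1,5),(2,6),(3,7),(4,8),(5,8),(6,8),(7,8),
   (8,8),(8,7),(8,6),(8,5),(8,4),(7,3),(6,2),(5,1),(4,0),(3,0),(2,0),(1,0)]

def findOpponentMarblesA (grid : List (List String)) (opponentSymbol : String) : List (Int × Int) :=
  (PySem.List.enumerate grid 0).foldl (fun borderMarbles lp =>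
    (PySem.List.enumerate lp.2 0).foldl (fun bm cp =>
      if PySem.List.pyGetD (PySem.List.pyGetD grid lp.1 []) cp.1 "" == opponentSymbol
      then bm ++ [(lp.1, cp.1)] else bm) borderMarbles) []

def findMarbleNearBorder (grid : List (List String)) (opponentSymbol : String) : List (Int × Int) :=
  let opponentMarbles := findOpponentMarblesA grid opponentSymbol
  let borders := getBorderA
  opponentMarbles.foldl (fun nextToBorder marble =>
    borders.foldl (fun ntb border => if border == marble then ntb ++ [marble] else ntb)
      nextToBorder) []

-- ===== PORT B =====
def borderSortedB : List (Nat × Nat) :=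
  [(0,0),(0,1),(0,2),(0,3),(0,4),(1,0),(1,5),(2,0),(2,6),(3,0),(3,7),(4,0),
   (4,8),(5,1),(5,8),(6,2),(6,8),(7,3),(7,8),(8,4),(8,5),(8,6),(8,7),(8,8)]

def findMarbleNearBorder_alt (grid : List (List String)) (opponentSymbol : String) : List (Int × Int) :=
  (borderSortedB.filter (fun p =>
      decide (p.1 < grid.length) && decide (p.2 < (grid.getD p.1 []).length) &&
      ((grid.getD p.1 []).getD p.2 "" == opponentSymbol))).map
    (fun p => ((p.1 : Int), (p.2 : Int)))

-- ===== PRECONDITION & SPEC =====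
def Spec_findMarbleNearBorder (grid : List (List String)) (opponentSymbol : String) (out : List (Int × Int)) : Prop := out = findMarbleNearBorder_alt grid opponentSymbol
instance (grid : List (List String)) (opponentSymbol : String) (out : List (Int × Int)) : Decidable (Spec_findMarbleNearBorder grid opponentSymbol out) := by unfold Spec_findMarbleNearBorder; infer_instance

-- ===== CLAIM (what is proved, stated in full; the proofs are below) =====
def Claim_equal_findMarbleNearBorder : Prop := ∀ (grid : List (List String)) (opponentSymbol : String), Dom_findMarbleNearBorder grid opponentSymbol → Spec_findMarbleNearBorder grid opponentSymbol (findMarbleNearBorder grid opponentSymbol)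

-- ===== LEMMAS AND PROOFS =====

-- strict lexicographic order on cells; both result lists are strictly increasing in it
def rLex (p q : Int × Int) : Prop := p.1 < q.1 ∨ (p.1 = q.1 ∧ p.2 < q.2)

-- B's border list, cast to Int pairs
def mappedBorder : List (Int × Int) := borderSortedB.map (fun p => ((p.1 : Int), (p.2 : Int)))

-- "cell m is an in-bounds grid cell holding the opponent symbol"
def CellP (grid : List (List String)) (sym : String) (m : Int × Int) : Prop :=
  ∃ k j : Nat, m = ((k : Int), (j : Int)) ∧ k < grid.length ∧
    j < (grid[k]?.getD []).length ∧ (grid[k]?.getD [])[j]?.getD "" = sym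

-- A's inner loop over a duplicate-free border list appends the marble at most once
lemma scan_border_foldl (m : Int × Int) :
    ∀ (bs : List (Int × Int)), bs.Nodup → ∀ acc,
      bs.foldl (fun a b => if b == m then a ++ [m] else a) acc
        = acc ++ if m ∈ bs then [m] else [] := by
  intro bs
  induction bs with
  | nil => intro _ acc; simp
  | cons b bs ih =>
    intro h acc
    rcases List.nodup_cons.mp h with ⟨hb, hnd⟩
    by_cases hbm : b = m
    · subst hbm
      simp only [List.foldl_cons, beq_self_eq_true, if_true, ih hnd, List.mem_cons]
      simp [hb]
    · have : (b == m) = false := beq_eq_false_iff_ne.mpr hbm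
      simp only [List.foldl_cons, this, ih hnd, List.mem_cons]
      simp [Ne.symm hbm]

lemma border_nodup : getBorderA.Nodup := by decide

lemma outer_foldl (ms : List (Int × Int)) :
    ∀ acc, ms.foldl (fun a m =>
        getBorderA.foldl (fun a2 b => if b == m then a2 ++ [m] else a2) a) acc
      = acc ++ ms.filter (fun m => decide (m ∈ getBorderA)) := by
  induction ms with
  | nil => intro acc; simp
  | cons m ms ih =>
    intro acc
    simp only [List.foldl_cons, scan_border_foldl m getBorderA border_nodup acc, ih,
      List.filter_cons]
    by_cases hm : m ∈ getBorderA <;> simp [hm]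

lemma A_eq_filter (grid : List (List String)) (sym : String) :
    findMarbleNearBorder grid sym
      = (findOpponentMarblesA grid sym).filter (fun m => decide (m ∈ getBorderA)) := by
  simpa [findMarbleNearBorder] using outer_foldl (findOpponentMarblesA grid sym) []

lemma marbles_eq (grid : List (List String)) (sym : String) :
    findOpponentMarblesA grid sym
      = (PySem.List.enumerate grid 0).flatMap (fun lp =>
          ((PySem.List.enumerate lp.2 0).filter (fun cp =>
              PySem.List.pyGetD (PySem.List.pyGetD grid lp.1 []) cp.1 "" == sym)).map
            (fun cp => (lp.1, cp.1))) := by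
  simp only [findOpponentMarblesA, PySem.List.foldl_append_if,
    PySem.List.foldl_append_eq_flatMap, List.nil_append]

lemma pairwise_marbles (grid : List (List String)) (sym : String) :
    (findOpponentMarblesA grid sym).Pairwise rLex := by
  rw [marbles_eq, List.pairwise_flatMap]
  constructor
  · intro lp _
    rw [List.pairwise_map]
    refine List.Pairwise.filter _ ?_
    exact (PySem.List.pairwise_lt_enumerate lp.2 0).imp (fun h => Or.inr ⟨rfl, h⟩)
  · refine (PySem.List.pairwise_lt_enumerate grid 0).imp ?_
    rintro lp lq h x hx y hy
    rcases List.mem_map.mp hx with ⟨cx, _, rfl⟩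
    rcases List.mem_map.mp hy with ⟨cy, _, rfl⟩
    exact Or.inl h

lemma mem_marbles (grid : List (List String)) (sym : String) (m : Int × Int) :
    m ∈ findOpponentMarblesA grid sym ↔ CellP grid sym m := by
  rw [marbles_eq]
  simp only [List.mem_flatMap, List.mem_map, List.mem_filter,
    PySem.List.mem_enumerate_iff, CellP]
  constructor
  · rintro ⟨lp, ⟨k, hk, rfl⟩, cp, ⟨⟨j, hj, rfl⟩, hmatch⟩, rfl⟩
    simp only [zero_add] at hmatch ⊢
    rw [PySem.List.pyGetD_natCast, PySem.List.pyGetD_natCast] at hmatch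
    refine ⟨k, j, rfl, hk, ?_, ?_⟩
    · simpa [List.getElem?_eq_getElem hk] using hj
    · simp only [List.getD_eq_getElem?_getD] at hmatch
      exact beq_iff_eq.mp hmatch
  · rintro ⟨k, j, rfl, hk, hj, hval⟩
    have hrow : grid[k]?.getD [] = grid[k]'hk := by simp [List.getElem?_eq_getElem hk]
    have hj' : j < (grid[k]'hk).length := by rw [hrow] at hj; exact hj
    refine ⟨((k : Int), grid[k]'hk), ⟨k, hk, by simp⟩,
      ((j : Int), (grid[k]'hk)[j]'hj'), ⟨⟨j, hj', by simp⟩, ?_⟩, rfl⟩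
    rw [PySem.List.pyGetD_natCast, PySem.List.pyGetD_natCast]
    simp only [List.getD_eq_getElem?_getD]
    exact beq_iff_eq.mpr hval

lemma B_eq_filter (grid : List (List String)) (sym : String) :
    findMarbleNearBorder_alt grid sym
      = mappedBorder.filter (fun q =>
          decide (q.1.toNat < grid.length) &&
          decide (q.2.toNat < (grid.getD q.1.toNat []).length) &&
          ((grid.getD q.1.toNat []).getD q.2.toNat "" == sym)) := by
  unfold findMarbleNearBorder_alt mappedBorder
  rw [List.filter_map]
  congr 1

lemma border_perm : getBorderA.Perm mappedBorder := by decide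

lemma pairwise_mappedBorder : mappedBorder.Pairwise rLex := by
  show mappedBorder.Pairwise (fun p q => p.1 < q.1 ∨ (p.1 = q.1 ∧ p.2 < q.2))
  decide

lemma rLex_ne {p q : Int × Int} (h : rLex p q) : p ≠ q := by
  rintro rfl; rcases h with h | ⟨_, h⟩ <;> omega

lemma rLex_antisymm {p q : Int × Int} (h1 : rLex p q) (h2 : rLex q p) : p = q := by
  exfalso; rcases h1 with h1 | ⟨e1, h1⟩ <;> rcases h2 with h2 | ⟨e2, h2⟩ <;> omega

lemma memA (grid : List (List String)) (sym : String) (m : Int × Int) :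
    m ∈ (findOpponentMarblesA grid sym).filter (fun m => decide (m ∈ getBorderA))
      ↔ m ∈ mappedBorder ∧ CellP grid sym m := by
  rw [List.mem_filter, mem_marbles]
  simp only [decide_eq_true_eq, border_perm.mem_iff]
  exact and_comm

lemma memB (grid : List (List String)) (sym : String) (m : Int × Int) :
    m ∈ mappedBorder.filter (fun q =>
          decide (q.1.toNat < grid.length) &&
          decide (q.2.toNat < (grid.getD q.1.toNat []).length) &&
          ((grid.getD q.1.toNat []).getD q.2.toNat "" == sym))
      ↔ m ∈ mappedBorder ∧ CellP grid sym m := by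
  rw [List.mem_filter]
  refine and_congr_right fun hm => ?_
  rcases List.mem_map.mp hm with ⟨⟨a, b⟩, _, rfl⟩
  simp only [Int.toNat_natCast, Bool.and_eq_true, decide_eq_true_eq, beq_iff_eq,
    List.getD_eq_getElem?_getD, CellP, Prod.mk.injEq, Nat.cast_inj]
  constructor
  · rintro ⟨⟨h1, h2⟩, h3⟩
    exact ⟨a, b, ⟨rfl, rfl⟩, h1, h2, h3⟩
  · rintro ⟨k, j, ⟨rfl, rfl⟩, h1, h2, h3⟩
    exact ⟨⟨h1, h2⟩, h3⟩

-- ===== VERDICT (by name: the statement is the Claim_ definition above) =====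
theorem findMarbleNearBorder_spec : Claim_equal_findMarbleNearBorder := by
  intro grid sym _
  unfold Spec_findMarbleNearBorder
  rw [A_eq_filter, B_eq_filter]
  have hPL : ((findOpponentMarblesA grid sym).filter
      (fun m => decide (m ∈ getBorderA))).Pairwise rLex :=
    (pairwise_marbles grid sym).filter _
  have hPR : (mappedBorder.filter (fun q =>
      decide (q.1.toNat < grid.length) &&
      decide (q.2.toNat < (grid.getD q.1.toNat []).length) &&
      ((grid.getD q.1.toNat []).getD q.2.toNat "" == sym))).Pairwise rLex :=
    pairwise_mappedBorder.filter _
  have hperm : ((findOpponentMarblesA grid sym).filter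
      (fun m => decide (m ∈ getBorderA))).Perm
      (mappedBorder.filter (fun q =>
        decide (q.1.toNat < grid.length) &&
        decide (q.2.toNat < (grid.getD q.1.toNat []).length) &&
        ((grid.getD q.1.toNat []).getD q.2.toNat "" == sym))) := by
    rw [List.perm_ext_iff_of_nodup (hPL.imp rLex_ne) (hPR.imp rLex_ne)]
    intro a; rw [memA, memB]
  exact hperm.eq_of_pairwise (fun a b _ _ h1 h2 => rLex_antisymm h1 h2) hPL hPR
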